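-- pv_equiv track=rewrite | github.com/LucasCallamullo/Clases-Particulares | Trabajos Practicos y DESAFIOS/TRABAJO PRACTICO 2/juanpablo_parcial2.py | analizar_hc_sc
-- ===== SOURCE A (Python) =====
-- def analizar_hc_sc(linea):
--     tiene_h = False
--     tiene_s = False
--     tiene_hc = False
--
--     for i in linea:
--         # Obtener SC
--         if tiene_s and i == "C":
--             tiene_hc = False
--             break
--         elif i == "S":
--             tiene_s = True
--         else:
--             tiene_s = False
--
--         # Obtener HC
--         if tiene_h and i == "C":
--             tiene_hc = True
--             break
--         elif i == "H":
--             tiene_h = True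
--         else:
--             tiene_h = False
--
--     if tiene_hc:
--         return "Hard Control"
--     else:
--         return "Soft Control"
-- ===== SOURCE B (Python) =====
-- def analizar_hc_sc(linea):
--     hc = linea.find("HC")
--     sc = linea.find("SC")
--     if hc != -1 and (sc == -1 or hc < sc):
--         return "Hard Control"
--     else:
--         return "Soft Control"
-- ===== Notes on version B (the rewrite author's own statement) =====
-- stated objective: faster
-- what changed: Replaces the char-by-char state machine with two str.find substring searches and a single index comparison (the patterns 'HC' and 'SC' can never complete at the same index, so the earlier start index is exactly the first-completed pattern).
import Mathlib
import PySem

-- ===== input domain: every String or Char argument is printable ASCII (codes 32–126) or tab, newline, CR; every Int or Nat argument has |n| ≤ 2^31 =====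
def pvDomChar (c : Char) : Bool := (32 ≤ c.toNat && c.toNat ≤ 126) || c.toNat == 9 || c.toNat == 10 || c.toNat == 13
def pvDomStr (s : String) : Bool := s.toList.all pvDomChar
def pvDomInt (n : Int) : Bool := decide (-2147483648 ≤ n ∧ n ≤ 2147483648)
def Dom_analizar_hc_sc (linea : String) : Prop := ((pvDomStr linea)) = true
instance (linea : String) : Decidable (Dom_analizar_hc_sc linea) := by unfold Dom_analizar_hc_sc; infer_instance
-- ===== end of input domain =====

-- B replaces A's character-by-character state machine by two substring searches
-- (str.find) and one index comparison; objective: simpler.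

-- ===== PORT A =====
-- A's for-loop with state (tiene_h, tiene_s); returning the loop's tiene_hc.
def pvLoopA : Bool → Bool → List Char → Bool
  | _, _, [] => false
  | tiene_h, tiene_s, i :: rest =>
    if tiene_s && i == 'C' then false            -- tiene_hc = False; break
    else
      let tiene_s' := i == 'S'
      if tiene_h && i == 'C' then true           -- tiene_hc = True; break
      else pvLoopA (i == 'H') tiene_s' rest

def analizar_hc_sc (linea : String) : String :=
  if pvLoopA false false linea.toList then "Hard Control" else "Soft Control"

-- ===== PORT B =====
def analizar_hc_sc_alt (linea : String) : String :=
  let hc := PySem.Str.find linea "HC"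
  let sc := PySem.Str.find linea "SC"
  if hc ≠ -1 ∧ (sc = -1 ∨ hc < sc) then "Hard Control" else "Soft Control"

-- ===== PRECONDITION & SPEC =====
def Spec_analizar_hc_sc (linea : String) (out : String) : Prop := out = analizar_hc_sc_alt linea
instance (linea : String) (out : String) : Decidable (Spec_analizar_hc_sc linea out) := by unfold Spec_analizar_hc_sc; infer_instance

-- ===== CLAIM (what is proved, stated in full; the proofs are below) =====
def Claim_equal_analizar_hc_sc : Prop := ∀ (linea : String), Dom_analizar_hc_sc linea → Spec_analizar_hc_sc linea (analizar_hc_sc linea)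

-- ===== LEMMAS AND PROOFS =====

-- index of the first occurrence of the pattern [a, 'C'] (-1 if absent)
def pvFind2 (a : Char) : List Char → Int
  | c :: d :: rest =>
    if c = a ∧ d = 'C' then 0
    else if pvFind2 a (d :: rest) = -1 then -1 else pvFind2 a (d :: rest) + 1
  | _ => -1

lemma pvFind2_ge (a : Char) : ∀ cs : List Char, -1 ≤ pvFind2 a cs := by
  intro cs
  induction cs with
  | nil => simp [pvFind2]
  | cons c rest ih =>
    cases rest with
    | nil => simp [pvFind2]
    | cons d rest2 =>
      simp only [pvFind2]
      split_ifs with h1 h2 <;> omega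

-- Chars.find is the unique "first occurrence" index.
lemma find_eq_of_first (s p : List Char) (j : Nat) (hj : p <+: s.drop j)
    (hmin : ∀ i, i < j → ¬ p <+: s.drop i) : PySem.Chars.find s p = j := by
  have hin : PySem.Chars.isIn p s = true :=
    (PySem.Chars.exists_prefix_drop_iff_isIn (s := s) (sub := p)).mp ⟨j, hj⟩
  have hinf : p <:+: s := (PySem.Chars.isIn_iff_infix (s := s) (sub := p)).mp hin
  have hnn : 0 ≤ PySem.Chars.find s p :=
    (PySem.Chars.find_nonneg_iff (s := s) (sub := p)).mpr hinf
  obtain ⟨hpre, hm⟩ := PySem.Chars.find_spec (s := s) (sub := p) hnn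
  have h1 : ¬ ((PySem.Chars.find s p).toNat < j) := fun h => hmin _ h hpre
  have h2 : ¬ (j < (PySem.Chars.find s p).toNat) := fun h => hm j h hj
  omega

lemma pvFind2_correct (a : Char) : ∀ cs : List Char, PySem.Chars.find cs [a, 'C'] = pvFind2 a cs := by
  intro cs
  induction cs with
  | nil =>
    rw [show pvFind2 a [] = -1 from rfl, PySem.Chars.find_eq_neg_one_iff]
    intro hinf; have := hinf.length_le; simp at this
  | cons c rest ih =>
    cases rest with
    | nil =>
      rw [show pvFind2 a [c] = -1 from rfl, PySem.Chars.find_eq_neg_one_iff]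
      intro hinf; have := hinf.length_le; simp at this
    | cons d rest2 =>
      by_cases h0 : c = a ∧ d = 'C'
      · rw [show pvFind2 a (c :: d :: rest2) = 0 by simp [pvFind2, h0]]
        exact find_eq_of_first _ _ 0 ⟨rest2, by simp [h0.1, h0.2]⟩ (by omega)
      · by_cases hr : PySem.Chars.find (d :: rest2) [a, 'C'] = -1
        · have hni : ¬ [a, 'C'] <:+: (d :: rest2) := (PySem.Chars.find_eq_neg_one_iff _ _).mp hr
          have : PySem.Chars.find (c :: d :: rest2) [a, 'C'] = -1 := by
            rw [PySem.Chars.find_eq_neg_one_iff]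
            intro hinf
            have hex : ∃ j, [a, 'C'] <+: (c :: d :: rest2).drop j :=
              (PySem.Chars.exists_prefix_drop_iff_isIn _ _).mpr
                ((PySem.Chars.isIn_iff_infix _ _).mpr hinf)
            obtain ⟨j, hj⟩ := hex
            cases j with
            | zero =>
              simp only [List.drop_zero, List.cons_prefix_cons] at hj
              exact h0 ⟨hj.1.symm, hj.2.1.symm⟩
            | succ k =>
              exact hni ((PySem.Chars.exists_prefix_drop_iff_isIn _ _).mp ⟨k, hj⟩ |>
                (PySem.Chars.isIn_iff_infix _ _).mp)
          rw [this]
          simp [pvFind2, h0, ← ih, hr]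
        · have hnn : 0 ≤ PySem.Chars.find (d :: rest2) [a, 'C'] := by
            have := PySem.Chars.neg_one_le_find (s := d :: rest2) (sub := [a, 'C'])
            omega
          obtain ⟨hpre, hmin⟩ := PySem.Chars.find_spec (s := d :: rest2) (sub := [a, 'C']) hnn
          have heq : PySem.Chars.find (c :: d :: rest2) [a, 'C'] =
              ((PySem.Chars.find (d :: rest2) [a, 'C']).toNat + 1 : Nat) := by
            apply find_eq_of_first
            · simpa using hpre
            · intro i hi hp
              cases i with
              | zero =>
                simp only [List.drop_zero, List.cons_prefix_cons] at hp
                exact h0 ⟨hp.1.symm, hp.2.1.symm⟩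
              | succ k =>
                exact hmin k (by omega) (by simpa using hp)
          rw [heq]
          simp only [pvFind2, h0, if_false, ← ih, hr]
          push_cast
          omega

def pvWin (cs : List Char) : Bool :=
  decide (pvFind2 'H' cs ≠ -1 ∧ (pvFind2 'S' cs = -1 ∨ pvFind2 'H' cs < pvFind2 'S' cs))

lemma pvLoopA_key : ∀ cs : List Char, ∀ c : Char,
    pvLoopA (c == 'H') (c == 'S') cs = pvWin (c :: cs) := by
  intro cs
  induction cs with
  | nil =>
    intro c
    simp [pvLoopA, pvWin, pvFind2]
  | cons d rest ih =>
    intro c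
    by_cases hSC : c = 'S' ∧ d = 'C'
    · obtain ⟨hc, hd⟩ := hSC; subst hc; subst hd
      have hL : pvLoopA ('S' == 'H') ('S' == 'S') ('C' :: rest) = false := by
        simp [pvLoopA]
      have e1 : pvFind2 'S' ('S' :: 'C' :: rest) = 0 := by simp [pvFind2]
      have e2 : pvFind2 'H' ('S' :: 'C' :: rest)
          = if pvFind2 'H' ('C' :: rest) = -1 then -1 else pvFind2 'H' ('C' :: rest) + 1 := by
        simp [pvFind2]
      have hg := pvFind2_ge 'H' ('C' :: rest)
      rw [hL]
      simp only [pvWin, e1, e2]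
      by_cases h1 : pvFind2 'H' ('C' :: rest) = -1 <;> simp [h1] <;> try omega
    · by_cases hHC : c = 'H' ∧ d = 'C'
      · obtain ⟨hc, hd⟩ := hHC; subst hc; subst hd
        have hL : pvLoopA ('H' == 'H') ('H' == 'S') ('C' :: rest) = true := by
          simp [pvLoopA]
        have e1 : pvFind2 'H' ('H' :: 'C' :: rest) = 0 := by simp [pvFind2]
        have e2 : pvFind2 'S' ('H' :: 'C' :: rest)
            = if pvFind2 'S' ('C' :: rest) = -1 then -1 else pvFind2 'S' ('C' :: rest) + 1 := by
          simp [pvFind2]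
        have hg := pvFind2_ge 'S' ('C' :: rest)
        rw [hL]
        simp only [pvWin, e1, e2]
        by_cases h1 : pvFind2 'S' ('C' :: rest) = -1 <;> simp [h1] <;> try omega
      · -- neither pattern completes at position 0 of c :: d :: rest
        have h1 : ((c == 'S') && (d == 'C')) = false := by
          by_cases hc : c = 'S'
          · by_cases hd : d = 'C'
            · exact absurd ⟨hc, hd⟩ hSC
            · simp [hd]
          · simp [hc]
        have h2 : ((c == 'H') && (d == 'C')) = false := by
          by_cases hc : c = 'H'
          · by_cases hd : d = 'C'
            · exact absurd ⟨hc, hd⟩ hHC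
            · simp [hd]
          · simp [hc]
        have step : pvLoopA (c == 'H') (c == 'S') (d :: rest)
            = pvLoopA (d == 'H') (d == 'S') rest := by
          simp only [pvLoopA, h1, h2]
          simp
        have e1 : pvFind2 'H' (c :: d :: rest)
            = if pvFind2 'H' (d :: rest) = -1 then -1 else pvFind2 'H' (d :: rest) + 1 := by
          simp [pvFind2, hHC]
        have e2 : pvFind2 'S' (c :: d :: rest)
            = if pvFind2 'S' (d :: rest) = -1 then -1 else pvFind2 'S' (d :: rest) + 1 := by
          simp [pvFind2, hSC]
        have hgH := pvFind2_ge 'H' (d :: rest)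
        have hgS := pvFind2_ge 'S' (d :: rest)
        rw [step, ih d]
        simp only [pvWin, e1, e2, decide_eq_decide]
        split_ifs <;> omega

lemma pvLoopA_top : ∀ cs : List Char, pvLoopA false false cs = pvWin cs := by
  intro cs
  cases cs with
  | nil => simp [pvLoopA, pvWin, pvFind2]
  | cons c rest =>
    have : pvLoopA false false (c :: rest) = pvLoopA (c == 'H') (c == 'S') rest := by
      simp [pvLoopA]
    rw [this, pvLoopA_key]

-- ===== VERDICT (by name: the statement is the Claim_ definition above) =====
theorem analizar_hc_sc_spec : Claim_equal_analizar_hc_sc := by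
  intro linea _
  unfold Spec_analizar_hc_sc analizar_hc_sc analizar_hc_sc_alt
  have hHC : PySem.Str.find linea "HC" = pvFind2 'H' linea.toList := by
    rw [PySem.Str.find_eq, show "HC".toList = ['H', 'C'] from rfl, pvFind2_correct]
  have hSC : PySem.Str.find linea "SC" = pvFind2 'S' linea.toList := by
    rw [PySem.Str.find_eq, show "SC".toList = ['S', 'C'] from rfl, pvFind2_correct]
  rw [pvLoopA_top, hHC, hSC]
  by_cases hP : (pvFind2 'H' linea.toList ≠ -1 ∧
      (pvFind2 'S' linea.toList = -1 ∨ pvFind2 'H' linea.toList < pvFind2 'S' linea.toList))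
  · simp [pvWin, hP]
  · simp only [pvWin, hP, decide_false, Bool.false_eq_true, if_false]
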